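-- pv_equiv track=rewrite | github.com/nik111215/Piton-revie | revie/encryptor.py | search_letter
-- ===== SOURCE A (Python) =====
-- import string
--
-- def search_letter(output_string):
--     length_lower_register_letter = len(LOWER_REGISTER_LETTER)
--     d = {LOWER_REGISTER_LETTER[i]: 0 for i in range(length_lower_register_letter)}
--     length_output_string = len(output_string)
--     for i in range(length_output_string):
--         if (LOWER_REGISTER_LETTER.find(output_string[i].lower()) != -1):
--             d[output_string[i].lower()] += 1
--     return d
--
-- LOWER_REGISTER_LETTER = string.ascii_lowercase
-- ===== SOURCE B (Python) =====
-- import string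
--
--
-- def search_letter(output_string):
--     # Alphabet-driven: for each of the 26 letters, scan the string and count
--     # the characters whose lowercase form is that letter. No counting dict at all.
--     return {ch: sum(1 for c in output_string if c.lower() == ch)
--             for ch in string.ascii_lowercase}
-- ===== Notes on version B (the rewrite author's own statement) =====
-- stated objective: simpler
-- what changed: A scans the string once, maintaining a pre-seeded 26-key counting dict indexed via find(); B keeps no counter state at all: it iterates the alphabet and, per letter, counts matching characters with a direct per-letter scan (sum of a generator), trading one stateful pass for 26 stateless ones.
import Mathlib
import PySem

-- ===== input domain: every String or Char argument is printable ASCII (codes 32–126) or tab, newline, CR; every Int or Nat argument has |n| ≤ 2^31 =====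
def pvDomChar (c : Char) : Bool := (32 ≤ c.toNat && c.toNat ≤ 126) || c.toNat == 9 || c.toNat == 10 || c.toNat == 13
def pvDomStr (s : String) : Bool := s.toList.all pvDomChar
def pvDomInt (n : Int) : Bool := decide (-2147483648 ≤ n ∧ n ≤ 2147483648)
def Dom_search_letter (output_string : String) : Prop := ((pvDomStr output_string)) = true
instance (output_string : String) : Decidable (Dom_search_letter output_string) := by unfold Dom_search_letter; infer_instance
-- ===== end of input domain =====

-- B keeps no counter state: it iterates the alphabet and counts matching characters with a
-- direct per-letter scan (26 stateless passes instead of one stateful dict-counting pass).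

-- string.ascii_lowercase
def pyAlphabet : String := "abcdefghijklmnopqrstuvwxyz"

-- ===== PORT A =====
def search_letter (output_string : String) : List (String × Int) :=
  let lenL : Int := PySem.Str.len pyAlphabet
  let d0 : PySem.Dict String Int :=
    (PySem.List.pyRange 0 lenL 1).foldl
      (fun d i => d.insert (String.ofList [PySem.List.pyGetD pyAlphabet.toList i ' ']) 0)
      PySem.Dict.empty
  let lenS : Int := PySem.Str.len output_string
  let d :=
    (PySem.List.pyRange 0 lenS 1).foldl
      (fun d i =>
        if PySem.Str.find pyAlphabet
            (PySem.Str.lower (String.ofList [PySem.List.pyGetD output_string.toList i ' '])) ≠ -1 then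
          -- Python's `d[c] += 1`: under the guard c is a single lowercase letter, a key of d
          d.modify (PySem.Str.lower (String.ofList [PySem.List.pyGetD output_string.toList i ' '])) 0 (· + 1)
        else d)
      d0
  d.items

-- ===== PORT B =====
def search_letter_alt (output_string : String) : List (String × Int) :=
  pyAlphabet.toList.map (fun ch =>
    (String.ofList [ch],
     -- sum(1 for c in output_string if c.lower() == ch)
     output_string.toList.foldl
       (fun acc c =>
         if PySem.Str.lower (String.ofList [c]) == String.ofList [ch] then acc + 1 else acc)
       (0 : Int)))

-- ===== PRECONDITION & SPEC =====
def Spec_search_letter (output_string : String) (out : List (String × Int)) : Prop := out = search_letter_alt output_string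
instance (output_string : String) (out : List (String × Int)) : Decidable (Spec_search_letter output_string out) := by unfold Spec_search_letter; infer_instance

-- ===== CLAIM (what is proved, stated in full; the proofs are below) =====
def Claim_equal_search_letter : Prop := ∀ (output_string : String), Dom_search_letter output_string → Spec_search_letter output_string (search_letter output_string)

-- ===== LEMMAS AND PROOFS =====

-- the lowercased one-char string both programs use
def pvKey (ch : Char) : String := PySem.Str.lower (String.ofList [ch])

def pvBump (d : PySem.Dict String Int) (k : String) : PySem.Dict String Int :=
  d.insert k (d.getD k 0 + 1)

-- the per-character transition of A's loop
def pvStep (d : PySem.Dict String Int) (ch : Char) : PySem.Dict String Int :=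
  if PySem.Str.isIn (pvKey ch) pyAlphabet then pvBump d (pvKey ch) else d

def pvKey? (ch : Char) : Option String :=
  if PySem.Str.isIn (pvKey ch) pyAlphabet then some (pvKey ch) else none

def pvAlphaKeys : List String := pyAlphabet.toList.map (fun c => String.ofList [c])

-- A's seed dict {letter: 0 for letter in ascii_lowercase}
def pvSeed : PySem.Dict String Int :=
  (PySem.List.pyRange 0 (PySem.Str.len pyAlphabet) 1).foldl
    (fun d i => d.insert (String.ofList [PySem.List.pyGetD pyAlphabet.toList i ' ']) 0)
    PySem.Dict.empty

lemma pvGuard_iff (t : String) :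
    (PySem.Str.find pyAlphabet t ≠ -1) ↔ PySem.Str.isIn t pyAlphabet = true := by
  simp [PySem.Chars.find_ne_neg_one_iff, PySem.Chars.isIn_iff_infix]

-- A's loop body is pvStep
lemma pvStepA_eq (d : PySem.Dict String Int) (ch : Char) :
    (if PySem.Str.find pyAlphabet (PySem.Str.lower (String.ofList [ch])) ≠ -1 then
      d.modify (PySem.Str.lower (String.ofList [ch])) 0 (· + 1)
    else d) = pvStep d ch := by
  unfold pvStep pvBump pvKey
  by_cases h : PySem.Str.isIn (PySem.Str.lower (String.ofList [ch])) pyAlphabet = true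
  · rw [if_pos ((pvGuard_iff _).mpr h), if_pos h]; rfl
  · rw [if_neg (fun hf => h ((pvGuard_iff _).mp hf)), if_neg h]

lemma pvFoldl_step_filterMap (l : List Char) (d : PySem.Dict String Int) :
    l.foldl pvStep d = (l.filterMap pvKey?).foldl pvBump d := by
  induction l generalizing d with
  | nil => rfl
  | cons c l ih =>
      by_cases h : PySem.Str.isIn (pvKey c) pyAlphabet = true
      · rw [List.foldl_cons, List.filterMap_cons,
            show pvKey? c = some (pvKey c) from by unfold pvKey?; rw [if_pos h],
            show pvStep d c = pvBump d (pvKey c) from by unfold pvStep; rw [if_pos h]]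
        exact ih _
      · rw [List.foldl_cons, List.filterMap_cons,
            show pvKey? c = none from by unfold pvKey?; rw [if_neg h],
            show pvStep d c = d from by unfold pvStep; rw [if_neg h]]
        exact ih _

lemma pvSet_update_of_mem (l : List String) (s : List String) (h : ∀ x ∈ l, x ∈ s) :
    PySem.Set.update s l = s := by
  induction l generalizing s with
  | nil => rfl
  | cons x l ih =>
      have hx : x ∈ s := h x (by simp)
      have hadd : PySem.Set.add s x = s := by simp [PySem.Set.add, PySem.Set.contains, hx]
      calc PySem.Set.update s (x :: l) = PySem.Set.update (PySem.Set.add s x) l := rfl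
        _ = s := by rw [hadd]; exact ih s (fun y hy => h y (by simp [hy]))

lemma pvKey_single (ch : Char) : pvKey ch = String.ofList [PySem.Chars.lowerChar ch] := by
  have hl : PySem.Chars.lower [ch] = [PySem.Chars.lowerChar ch] := by
    simp [PySem.Chars.lower]
  have := congrArg String.ofList hl
  simpa [pvKey, PySem.Str.lower] using this

lemma pvKey?_mem (ch : Char) (k : String) (h : pvKey? ch = some k) : k ∈ pvAlphaKeys := by
  unfold pvKey? at h
  by_cases hg : PySem.Str.isIn (pvKey ch) pyAlphabet = true
  · rw [if_pos hg] at h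
    have hk : k = pvKey ch := (Option.some.inj h).symm
    have hinf : PySem.Chars.lower [ch] <:+: pyAlphabet.toList :=
      (PySem.Chars.isIn_iff_infix _ _).mp (by simpa [pvKey] using hg)
    have hl : PySem.Chars.lower [ch] = [PySem.Chars.lowerChar ch] := by
      simp [PySem.Chars.lower]
    rw [hl] at hinf
    have hmem : PySem.Chars.lowerChar ch ∈ pyAlphabet.toList := by
      obtain ⟨s, t, hst⟩ := hinf
      rw [← hst]; simp
    rw [hk, pvKey_single]
    exact List.mem_map.mpr ⟨_, hmem, rfl⟩
  · rw [if_neg hg] at h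
    exact absurd h (by simp)

-- for ch in the alphabet, pvKey? c matches (ofList [ch]) exactly when pvKey c equals it
lemma pvCount_filterMap (ch : Char) (hch : ch ∈ pyAlphabet.toList) (l : List Char) :
    (l.filterMap pvKey?).count (String.ofList [ch])
      = l.countP (fun c => pvKey c == String.ofList [ch]) := by
  induction l with
  | nil => rfl
  | cons c l ih =>
      rw [List.filterMap_cons, List.countP_cons]
      by_cases he : pvKey c = String.ofList [ch]
      · have hin : PySem.Str.isIn (pvKey c) pyAlphabet = true := by
          rw [he]
          have : [ch] <:+: pyAlphabet.toList := by
            obtain ⟨s, t, hst⟩ := List.append_of_mem hch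
            exact ⟨s, t, by simpa using hst.symm⟩
          simpa [PySem.Chars.isIn_iff_infix, pvKey_single,
            show PySem.Chars.lowerChar ch = ch from by
              have : ch ∈ "abcdefghijklmnopqrstuvwxyz".toList := hch
              fin_cases this <;> decide] using this
        rw [show pvKey? c = some (pvKey c) from by unfold pvKey?; rw [if_pos hin], he]
        simp [ih]
      · have hne : (pvKey c == String.ofList [ch]) = false := by simp [he]
        by_cases hin : PySem.Str.isIn (pvKey c) pyAlphabet = true
        · rw [show pvKey? c = some (pvKey c) from by unfold pvKey?; rw [if_pos hin]]
          simp [ih, he, hne]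
        · rw [show pvKey? c = none from by unfold pvKey?; rw [if_neg hin]]
          simp [ih, hne]

lemma pvSeed_keys : pvSeed.keys = pvAlphaKeys := by decide
lemma pvAlpha_nodup : pvAlphaKeys.Nodup := by decide
lemma pvSeed_getD : ∀ k ∈ pvAlphaKeys, pvSeed.getD k 0 = 0 := by decide

-- ===== VERDICT (by name: the statement is the Claim_ definition above) =====
theorem search_letter_spec : Claim_equal_search_letter := by
  intro s _
  unfold Spec_search_letter search_letter search_letter_alt
  simp only []
  rw [show PySem.Str.len s = ((s.toList.length : Nat) : Int) from by simp]
  have hA : (fun (d : PySem.Dict String Int) (i : Int) =>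
      if PySem.Str.find pyAlphabet
          (PySem.Str.lower (String.ofList [PySem.List.pyGetD s.toList i ' '])) ≠ -1 then
        d.modify (PySem.Str.lower (String.ofList [PySem.List.pyGetD s.toList i ' '])) 0 (· + 1)
      else d) =
      (fun d i => pvStep d (PySem.List.pyGetD s.toList i ' ')) := by
    funext d i
    exact pvStepA_eq d _
  rw [hA, PySem.List.foldl_pyRange_zero_pyGetD' s.toList ' ' pvStep]
  have hseed : (PySem.List.pyRange 0 (PySem.Str.len pyAlphabet) 1).foldl
      (fun d i => d.insert (String.ofList [PySem.List.pyGetD pyAlphabet.toList i ' ']) 0)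
      PySem.Dict.empty = pvSeed := rfl
  rw [hseed, pvFoldl_step_filterMap]
  set fl := s.toList.filterMap pvKey? with hfl
  have hflmem : ∀ x ∈ fl, x ∈ pvSeed.keys := by
    intro x hx
    rw [pvSeed_keys]
    obtain ⟨c, _, hc⟩ := List.mem_filterMap.mp (hfl ▸ hx)
    exact pvKey?_mem c x hc
  have hbump : pvBump = (fun (d : PySem.Dict String Int) k => d.insert k (d.getD k 0 + 1)) := rfl
  have hkeys : (fl.foldl pvBump pvSeed).keys = pvAlphaKeys := by
    rw [hbump, PySem.Dict.keys_foldl_insert, pvSet_update_of_mem _ _ hflmem, pvSeed_keys]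
  have hitems := PySem.Dict.items_eq_map_keys (fl.foldl pvBump pvSeed)
      (by rw [hkeys]; exact pvAlpha_nodup) (0 : Int)
  rw [hitems, hkeys]
  unfold pvAlphaKeys
  rw [List.map_map]
  apply List.map_congr_left
  intro ch hch
  simp only [Function.comp]
  refine Prod.ext rfl ?_
  show (fl.foldl pvBump pvSeed).getD (String.ofList [ch]) 0 = _
  rw [hbump, PySem.Dict.getD_foldl_insert_add_one,
      pvSeed_getD _ (List.mem_map.mpr ⟨ch, hch, rfl⟩),
      pvCount_filterMap ch hch]
  show _ = s.toList.foldl (fun acc c => if (pvKey c == String.ofList [ch]) = true then acc + 1 else acc) 0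
  rw [PySem.List.foldl_if_add_one]
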